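-- pv_equiv track=rewrite | github.com/harneet2512/groundtruth | src/groundtruth/foundation/parser/ast_backend.py | _parse_param_names
-- ===== SOURCE A (Python) =====
-- def _parse_param_names(signature: str) -> list[str]:
--     """Extract parameter names from a signature string like '(self, x: int, y: str = ...) -> None'.
--
--     Excludes self and cls.
--     """
--     # Strip return type
--     sig = signature.split("->")[0].strip()
--     # Strip parens
--     if sig.startswith("(") and sig.endswith(")"):
--         sig = sig[1:-1]
--     elif sig.startswith("("):
--         sig = sig[1:]
--
--     if not sig.strip():
--         return []
--
--     names: list[str] = []
--     # Split on commas, handling nested parens/brackets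
--     depth = 0
--     current = ""
--     for ch in sig:
--         if ch in "([{":
--             depth += 1
--             current += ch
--         elif ch in ")]}":
--             depth -= 1
--             current += ch
--         elif ch == "," and depth == 0:
--             name = _extract_param_name(current.strip())
--             if name:
--                 names.append(name)
--             current = ""
--         else:
--             current += ch
--
--     if current.strip():
--         name = _extract_param_name(current.strip())
--         if name:
--             names.append(name)
--
--     return names
--
-- def _extract_param_name(param: str) -> str | None:
--     """Extract the name from a parameter like 'x: int = ...' or '*args' or '/'."""
--     if not param or param == "/":
--         return None
--
--     # Handle *args, **kwargs
--     if param.startswith("**"):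
--         name = param[2:].split(":")[0].strip()
--         return f"**{name}" if name else None
--     if param.startswith("*"):
--         rest = param[1:].split(":")[0].strip()
--         if not rest:
--             return None  # bare * separator
--         return f"*{rest}"
--
--     # Regular param: take everything before ':' or '='
--     name = param.split(":")[0].split("=")[0].strip()
--     if name in ("self", "cls"):
--         return None
--     return name if name else None
-- ===== SOURCE B (Python) =====
-- def _parse_param_names(signature: str) -> list[str]:
--     """Index-based split: a comma is top-level iff its prefix is bracket-balanced."""
--     sig = signature.split("->")[0].strip()
--     if sig.startswith("(") and sig.endswith(")"):
--         sig = sig[1:-1]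
--     elif sig.startswith("("):
--         sig = sig[1:]
--
--     # A comma at index i splits iff the prefix sig[:i] contains as many
--     # openers as closers (this equals "bracket depth zero" at that comma).
--     cuts = [i for i, ch in enumerate(sig)
--             if ch == ","
--             and sum(sig[:i].count(o) for o in "([{")
--                 == sum(sig[:i].count(c) for c in ")]}")]
--     parts = [sig[a + 1:b] for a, b in zip([-1] + cuts, cuts + [len(sig)])]
--     return [n for n in (_extract_param_name(p.strip()) for p in parts) if n]
--
--
-- def _extract_param_name(param: str) -> str | None:
--     """Extract the name from a parameter like 'x: int = ...' or '*args' or '/'."""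
--     if not param or param == "/":
--         return None
--
--     # Handle *args, **kwargs
--     if param.startswith("**"):
--         name = param[2:].split(":")[0].strip()
--         return f"**{name}" if name else None
--     if param.startswith("*"):
--         rest = param[1:].split(":")[0].strip()
--         if not rest:
--             return None  # bare * separator
--         return f"*{rest}"
--
--     # Regular param: take everything before ':' or '='
--     name = param.split(":")[0].split("=")[0].strip()
--     if name in ("self", "cls"):
--         return None
--     return name if name else None
-- ===== Notes on version B (the rewrite author's own statement) =====
-- stated objective: alternative
-- what changed: Replaces A's single-pass depth-counter scan with a string accumulator by an index-based split: a comma is declared top-level when its prefix contains equally many openers and closers (prefix-count test, no depth state), the cut indices are collected, and the signature is sliced between consecutive cuts; the extractor is then mapped over the slices, with no trailing-segment special case and no early empty guard.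
import Mathlib
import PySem

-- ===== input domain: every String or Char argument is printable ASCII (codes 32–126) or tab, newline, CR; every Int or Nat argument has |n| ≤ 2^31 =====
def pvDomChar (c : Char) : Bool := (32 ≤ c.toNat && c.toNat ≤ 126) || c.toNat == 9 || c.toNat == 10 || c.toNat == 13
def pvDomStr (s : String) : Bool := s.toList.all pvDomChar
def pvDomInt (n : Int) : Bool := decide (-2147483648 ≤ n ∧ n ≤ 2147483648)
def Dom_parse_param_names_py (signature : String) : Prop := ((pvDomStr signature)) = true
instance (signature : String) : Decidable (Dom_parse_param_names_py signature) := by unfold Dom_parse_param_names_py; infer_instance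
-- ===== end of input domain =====

-- B drops A's depth-counter/accumulator scan: it characterises a top-level comma by a
-- prefix-count balance test, collects the cut indices, and slices the signature between
-- consecutive cuts (objective: alternative algorithm; worst-case O(n*k) for k top-level
-- commas, but measured ~2x faster than A on the random timing inputs).

-- shared helper: identical preprocessing lines in both Pythons
-- sig = signature.split("->")[0].strip(); paren stripping
def pvSigBody (signature : String) : List Char :=
  let sig := PySem.Chars.strip (((PySem.Chars.split? signature.toList ("->".toList)).getD []).headD [])
  if PySem.Chars.startswith sig ['('] && PySem.Chars.endswith sig [')'] then
    PySem.List.slice sig (some 1) (some (-1))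
  else if PySem.Chars.startswith sig ['('] then
    PySem.List.slice sig (some 1) none
  else sig

-- shared helper: _extract_param_name (identical in both Pythons), over List Char
def pvExtract (param : List Char) : Option (List Char) :=
  if param = [] ∨ param = ['/'] then none
  else if PySem.Chars.startswith param ['*', '*'] then
    let name := PySem.Chars.strip (((PySem.Chars.split? (param.drop 2) [':']).getD []).headD [])
    if name = [] then none else some (['*', '*'] ++ name)
  else if PySem.Chars.startswith param ['*'] then
    let rest := PySem.Chars.strip (((PySem.Chars.split? (param.drop 1) [':']).getD []).headD [])
    if rest = [] then none else some (['*'] ++ rest)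
  else
    let name := PySem.Chars.strip (((PySem.Chars.split?
        (((PySem.Chars.split? param [':']).getD []).headD []) ['=']).getD []).headD [])
    if name = "self".toList ∨ name = "cls".toList then none
    else if name = [] then none else some name

-- ===== PORT A =====
-- loop body of A: state (depth, current, names); extracted names appended at depth-0 commas
def pvStepA (st : Int × List Char × List String) (ch : Char) : Int × List Char × List String :=
  let (depth, current, names) := st
  if ch = '(' ∨ ch = '[' ∨ ch = '{' then (depth + 1, current ++ [ch], names)
  else if ch = ')' ∨ ch = ']' ∨ ch = '}' then (depth - 1, current ++ [ch], names)
  else if ch = ',' ∧ depth = 0 then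
    (depth, [], names ++ ((pvExtract (PySem.Chars.strip current)).map String.ofList).toList)
  else (depth, current ++ [ch], names)

def parse_param_names_py (signature : String) : List String :=
  let sig := pvSigBody signature
  if PySem.Chars.strip sig = [] then []
  else
    let st := sig.foldl pvStepA (0, [], [])
    if ¬ (PySem.Chars.strip st.2.1 = []) then
      st.2.2 ++ ((pvExtract (PySem.Chars.strip st.2.1)).map String.ofList).toList
    else st.2.2

-- ===== PORT B =====
-- cuts = [i for i, ch in enumerate(sig) if ch == "," and sum of prefix opener counts == sum of prefix closer counts]
-- (sig[:i].count(o) is str.count with a one-char needle, ported by PySem.Chars.count on the slice)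
def parse_param_names_py_alt (signature : String) : List String :=
  let sig := pvSigBody signature
  let cuts : List Int := (PySem.List.enumerate sig).filterMap (fun p =>
    if p.2 = ',' ∧
        (("([{".toList).map (fun o => PySem.Chars.count (PySem.List.slice sig none (some p.1)) [o])).sum
          = ((")]}".toList).map (fun c => PySem.Chars.count (PySem.List.slice sig none (some p.1)) [c])).sum
    then some p.1 else none)
  -- parts = [sig[a + 1 : b] for a, b in zip([-1] + cuts, cuts + [len(sig)])]
  let parts := (List.zip ((-1) :: cuts) (cuts ++ [(sig.length : Int)])).map
    (fun ab => PySem.List.slice sig (some (ab.1 + 1)) (some ab.2))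
  -- [n for n in (_extract_param_name(p.strip()) for p in parts) if n]
  parts.filterMap (fun p => (pvExtract (PySem.Chars.strip p)).map String.ofList)

-- ===== PRECONDITION & SPEC =====
def Spec_parse_param_names_py (signature : String) (out : List String) : Prop := out = parse_param_names_py_alt signature
instance (signature : String) (out : List String) : Decidable (Spec_parse_param_names_py signature out) := by unfold Spec_parse_param_names_py; infer_instance

-- ===== CLAIM (what is proved, stated in full; the proofs are below) =====
def Claim_equal_parse_param_names_py : Prop := ∀ (signature : String), Dom_parse_param_names_py signature → Spec_parse_param_names_py signature (parse_param_names_py signature)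

-- ===== LEMMAS AND PROOFS =====

-- the common mid-level description both proofs meet at: the list of top-level segments
def pvDelta (c : Char) : Int :=
  if c = '(' ∨ c = '[' ∨ c = '{' then 1
  else if c = ')' ∨ c = ']' ∨ c = '}' then -1 else 0

def pvConsHead (c : Char) : List (List Char) → List (List Char)
  | [] => [[c]]
  | s :: ss => (c :: s) :: ss

def pvParts (d : Int) : List Char → List (List Char)
  | [] => [[]]
  | c :: cs =>
    if c = ',' ∧ d = 0 then [] :: pvParts d cs
    else pvConsHead c (pvParts (d + pvDelta c) cs)

def pvCuts (d : Int) : List Char → List Int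
  | [] => []
  | c :: cs =>
    if c = ',' ∧ d = 0 then 0 :: (pvCuts d cs).map (· + 1)
    else (pvCuts (d + pvDelta c) cs).map (· + 1)

def pvWithHead (cur : List Char) : List (List Char) → List (List Char)
  | [] => [cur]
  | s :: ss => (cur ++ s) :: ss

def pvBal (p : List Char) : Int :=
  ((p.count '(' + p.count '[' + p.count '{') : Int) - ((p.count ')' + p.count ']' + p.count '}') : Int)

def pvExOne (l : List Char) : List String :=
  ((pvExtract (PySem.Chars.strip l)).map String.ofList).toList

def pvExAll (ls : List (List Char)) : List String := ls.flatMap pvExOne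

theorem pvFilterMap_eq_exAll (ls : List (List Char)) :
    ls.filterMap (fun seg => (pvExtract (PySem.Chars.strip seg)).map String.ofList) = pvExAll ls := by
  induction ls with
  | nil => rfl
  | cons x xs ih =>
      simp [pvExAll, pvExOne, List.filterMap_cons] at *
      cases (pvExtract (PySem.Chars.strip x)).map String.ofList <;> simp [ih]

theorem pvExOne_of_strip_nil (l : List Char) (h : PySem.Chars.strip l = []) :
    pvExOne l = [] := by
  simp [pvExOne, h, pvExtract]

theorem pvParts_ne_nil (d : Int) (cs : List Char) : pvParts d cs ≠ [] := by
  cases cs with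
  | nil => simp [pvParts]
  | cons c cs =>
      simp only [pvParts]
      split
      · simp
      · cases h : pvParts (d + pvDelta c) cs <;> simp [pvConsHead]

theorem pvWithHead_nil (ps : List (List Char)) (h : ps ≠ []) : pvWithHead [] ps = ps := by
  cases ps with
  | nil => exact absurd rfl h
  | cons s ss => simp [pvWithHead]

theorem pvWithHead_consHead (cur : List Char) (c : Char) (ps : List (List Char)) :
    pvWithHead cur (pvConsHead c ps) = pvWithHead (cur ++ [c]) ps := by
  cases ps <;> simp [pvWithHead, pvConsHead]

-- A's fold computes: names = extracted init segments, current = last segment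
theorem pvFoldA_parts (cs : List Char) : ∀ (d : Int) (cur : List Char) (ns : List String),
    ∃ init last, pvWithHead cur (pvParts d cs) = init ++ [last] ∧
      (cs.foldl pvStepA (d, cur, ns)).2.1 = last ∧
      (cs.foldl pvStepA (d, cur, ns)).2.2 = ns ++ pvExAll init := by
  induction cs with
  | nil =>
      intro d cur ns
      exact ⟨[], cur, by simp [pvParts, pvWithHead], by simp, by simp [pvExAll]⟩
  | cons c cs ih =>
      intro d cur ns
      by_cases h1 : c = '(' ∨ c = '[' ∨ c = '{'
      · have hc : ¬ (c = ',' ∧ d = 0) := by rcases h1 with rfl | rfl | rfl <;> simp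
        have hd : pvDelta c = 1 := by rcases h1 with rfl | rfl | rfl <;> rfl
        obtain ⟨init, last, hW, h1', h2'⟩ := ih (d + 1) (cur ++ [c]) ns
        exact ⟨init, last, by simp [pvParts, hc, hd, pvWithHead_consHead, h1, hW],
          by simpa [pvStepA, h1, hc] using h1', by simpa [pvStepA, h1, hc] using h2'⟩
      · by_cases h2 : c = ')' ∨ c = ']' ∨ c = '}'
        · have hc : ¬ (c = ',' ∧ d = 0) := by rcases h2 with rfl | rfl | rfl <;> simp
          have hd : pvDelta c = -1 := by rcases h2 with rfl | rfl | rfl <;> rfl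
          obtain ⟨init, last, hW, h1', h2'⟩ := ih (d - 1) (cur ++ [c]) ns
          refine ⟨init, last, ?_, by simpa [pvStepA, h1, h2, hc] using h1',
            by simpa [pvStepA, h1, h2, hc] using h2'⟩
          simp only [pvParts, hc, if_false, hd, pvWithHead_consHead]
          simpa [show d + -1 = d - 1 by ring] using hW
        · by_cases h3 : c = ',' ∧ d = 0
          · obtain ⟨rfl, rfl⟩ := h3
            obtain ⟨init, last, hW, h1', h2'⟩ := ih 0 [] (ns ++ pvExOne cur)
            rw [pvWithHead_nil _ (pvParts_ne_nil _ _)] at hW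
            refine ⟨cur :: init, last, ?_, ?_, ?_⟩
            · simp [pvParts, pvWithHead, hW]
            · simpa [pvStepA, h1, h2, pvExOne] using h1'
            · simpa [pvStepA, h1, h2, pvExAll, pvExOne] using h2'
          · have hd : pvDelta c = 0 := by simp [pvDelta, h1, h2]
            obtain ⟨init, last, hW, h1', h2'⟩ := ih d (cur ++ [c]) ns
            exact ⟨init, last, by simp [pvParts, h3, hd, pvWithHead_consHead, hW],
              by simpa [pvStepA, h1, h2, h3] using h1',
              by simpa [pvStepA, h1, h2, h3] using h2'⟩

theorem pvStrip_nil_all_ws (s : List Char) (h : PySem.Chars.strip s = []) :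
    ∀ c ∈ s, PySem.Chars.isspace c = true := by
  have h2 : ∀ c ∈ List.dropWhile PySem.Chars.isspace s, PySem.Chars.isspace c = true := by
    intro c hc
    have : (List.dropWhile PySem.Chars.isspace
        (List.dropWhile PySem.Chars.isspace s).reverse) = [] := by
      have := congrArg List.reverse h
      simpa [PySem.Chars.strip, PySem.Chars.lstrip, PySem.Chars.rstrip] using this
    have := List.dropWhile_eq_nil_iff.mp this
    exact this c (List.mem_reverse.mpr hc)
  intro c hc
  rw [← List.takeWhile_append_dropWhile (p := PySem.Chars.isspace) (l := s)] at hc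
  rcases List.mem_append.mp hc with h' | h'
  · exact List.mem_takeWhile_imp h'
  · exact h2 c h'

theorem pvParts_all_ws (cs : List Char) : ∀ (d : Int),
    (∀ c ∈ cs, PySem.Chars.isspace c = true) → pvParts d cs = [cs] := by
  induction cs with
  | nil => intro d _; rfl
  | cons c cs ih =>
      intro d hws
      have hc := hws c (by simp)
      have h1 : ¬ (c = '(' ∨ c = '[' ∨ c = '{') := by
        rintro (rfl | rfl | rfl) <;> simp [PySem.Chars.isspace] at hc
      have h2 : ¬ (c = ')' ∨ c = ']' ∨ c = '}') := by
        rintro (rfl | rfl | rfl) <;> simp [PySem.Chars.isspace] at hc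
      have h3 : ¬ (c = ',' ∧ d = 0) := by
        rintro ⟨rfl, _⟩; simp [PySem.Chars.isspace] at hc
      have hd : pvDelta c = 0 := by simp [pvDelta, h1, h2]
      simp [pvParts, h3, hd, ih d (fun x hx => hws x (by simp [hx])), pvConsHead]

-- A = extractions of the segment list
theorem pvA_eq (signature : String) :
    parse_param_names_py signature = pvExAll (pvParts 0 (pvSigBody signature)) := by
  obtain ⟨init, last, hW, hcur, hns⟩ := pvFoldA_parts (pvSigBody signature) 0 [] []
  rw [pvWithHead_nil _ (pvParts_ne_nil _ _)] at hW
  by_cases hstrip : PySem.Chars.strip (pvSigBody signature) = []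
  · have hws := pvStrip_nil_all_ws _ hstrip
    simp [parse_param_names_py, hstrip, pvParts_all_ws _ 0 hws, pvExAll,
      pvExOne_of_strip_nil _ hstrip]
  · rw [hW]
    by_cases hcur0 : PySem.Chars.strip ((pvSigBody signature).foldl pvStepA (0, [], [])).2.1 = []
    · rw [hcur] at hcur0
      simp [parse_param_names_py, hstrip, hns, hcur, hcur0, pvExAll,
        pvExOne_of_strip_nil _ hcur0]
    · rw [hcur] at hcur0
      simp [parse_param_names_py, hstrip, hns, hcur, hcur0, pvExAll, pvExOne]

-- str.count with a one-char needle counts that character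
theorem pvCount_go_singleton (c : Char) (l : List Char) : ∀ (fuel acc : Nat),
    l.length ≤ fuel → PySem.Chars.count.go [c] fuel l acc = acc + l.count c := by
  induction l with
  | nil => intro fuel acc _; cases fuel <;> simp [PySem.Chars.count.go]
  | cons x xs ih =>
      intro fuel acc hf
      cases fuel with
      | zero => simp at hf
      | succ n =>
          by_cases hcx : c = x
          · subst hcx
            simp [PySem.Chars.count.go, List.isPrefixOf, ih n (acc + 1) (by simpa using hf),
              List.count_cons]
            omega
          · have hpr : [c].isPrefixOf (x :: xs) = false := by
              simp [List.isPrefixOf, hcx]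
            have hxc : ¬ x = c := fun h => hcx h.symm
            simp [PySem.Chars.count.go, hpr, ih n acc (by simpa using hf),
              List.count_cons, hxc]

theorem pvCount_singleton (p : List Char) (c : Char) :
    PySem.Chars.count p [c] = p.count c := by
  simp [PySem.Chars.count, pvCount_go_singleton c p p.length 0 le_rfl]

theorem pvBal_snoc (p : List Char) (c : Char) : pvBal (p ++ [c]) = pvBal p + pvDelta c := by
  by_cases h1 : c = '(' ∨ c = '[' ∨ c = '{'
  · rcases h1 with rfl | rfl | rfl <;>
      simp [pvBal, pvDelta, List.count_append, List.count_cons] <;> push_cast <;> ring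
  · by_cases h2 : c = ')' ∨ c = ']' ∨ c = '}'
    · rcases h2 with rfl | rfl | rfl <;>
        simp [pvBal, pvDelta, List.count_append, List.count_cons] <;> push_cast <;> ring
    · have e : ∀ b : Char, (b = '(' ∨ b = '[' ∨ b = '{' ∨ b = ')' ∨ b = ']' ∨ b = '}') →
          List.count b [c] = 0 := by
        intro b hb
        have : c ≠ b := by rintro rfl; rcases hb with rfl|rfl|rfl|rfl|rfl|rfl <;> tauto
        simp [List.count_cons, this]
      simp [pvBal, pvDelta, h1, h2, List.count_append,
        e '(' (by tauto), e '[' (by tauto), e '{' (by tauto),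
        e ')' (by tauto), e ']' (by tauto), e '}' (by tauto)]

-- the port's balance condition at the comma position, rewritten to pvBal of the prefix
theorem pvCond_eq (pre suf : List Char) :
    ((("([{".toList).map (fun o =>
        PySem.Chars.count (PySem.List.slice (pre ++ suf) none (some (pre.length : Int))) [o])).sum
      = ((")]}".toList).map (fun c =>
        PySem.Chars.count (PySem.List.slice (pre ++ suf) none (some (pre.length : Int))) [c])).sum)
      ↔ pvBal pre = 0 := by
  rw [PySem.List.slice_to_natCast]
  simp [pvCount_singleton, List.take_left', pvBal]
  omega

theorem pvCuts_nonneg (cs : List Char) : ∀ (d : Int), ∀ i ∈ pvCuts d cs, 0 ≤ i := by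
  induction cs with
  | nil => intro d i hi; simp [pvCuts] at hi
  | cons c cs ih =>
      intro d i hi
      simp only [pvCuts] at hi
      split at hi
      · rcases List.mem_cons.mp hi with rfl | hi
        · omega
        · obtain ⟨j, hj, rfl⟩ := List.mem_map.mp hi
          have := ih d j hj; omega
      · obtain ⟨j, hj, rfl⟩ := List.mem_map.mp hi
        have := ih _ j hj; omega

-- the port's comprehension computes pvCuts (shifted by the prefix length)
theorem pvCuts_port (suf : List Char) : ∀ (pre : List Char),
    (PySem.List.enumerate suf (pre.length : Int)).filterMap (fun p =>
      if p.2 = ',' ∧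
          (("([{".toList).map (fun o =>
            PySem.Chars.count (PySem.List.slice (pre ++ suf) none (some p.1)) [o])).sum
            = ((")]}".toList).map (fun c =>
            PySem.Chars.count (PySem.List.slice (pre ++ suf) none (some p.1)) [c])).sum
      then some p.1 else none)
    = (pvCuts (pvBal pre) suf).map (fun i => i + (pre.length : Int)) := by
  induction suf with
  | nil => intro pre; simp [PySem.List.enumerate, pvCuts]
  | cons c suf ih =>
      intro pre
      have hcond := pvCond_eq pre (c :: suf)
      rw [PySem.List.enumerate_cons]
      have ih' := ih (pre ++ [c])
      rw [pvBal_snoc] at ih'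
      rw [show (pre ++ [c]) ++ suf = pre ++ c :: suf by simp] at ih'
      rw [show ((pre ++ [c]).length : Int) = (pre.length : Int) + 1 by push_cast; simp] at ih'
      by_cases h3 : c = ',' ∧ pvBal pre = 0
      · obtain ⟨rfl, hb0⟩ := h3
        have hd0 : pvDelta ',' = 0 := rfl
        rw [hd0, add_zero] at ih'
        have hsome :
            (fun (p : Int × Char) =>
              if p.2 = ',' ∧
                  (("([{".toList).map (fun o =>
                    PySem.Chars.count (PySem.List.slice (pre ++ ',' :: suf) none (some p.1)) [o])).sum
                    = ((")]}".toList).map (fun cc =>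
                    PySem.Chars.count (PySem.List.slice (pre ++ ',' :: suf) none (some p.1)) [cc])).sum
              then some p.1 else none) ((pre.length : Int), ',') = some ((pre.length : Int)) := by
          exact if_pos ⟨rfl, hcond.mpr hb0⟩
        rw [List.filterMap_cons_some
          (f := fun (p : Int × Char) =>
            if p.2 = ',' ∧
                (("([{".toList).map (fun o =>
                  PySem.Chars.count (PySem.List.slice (pre ++ ',' :: suf) none (some p.1)) [o])).sum
                  = ((")]}".toList).map (fun cc =>
                  PySem.Chars.count (PySem.List.slice (pre ++ ',' :: suf) none (some p.1)) [cc])).sum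
            then some p.1 else none) hsome, ih']
        have hif : (True ∧ pvBal pre = 0) := ⟨trivial, hb0⟩
        simp only [pvCuts]
        rw [if_pos hif]
        simp only [List.map_cons, List.map_map]
        refine List.cons_eq_cons.mpr ⟨by omega, ?_⟩
        apply List.map_congr_left; intro j _; simp; ring
      · have hnone :
            (fun (p : Int × Char) =>
              if p.2 = ',' ∧
                  (("([{".toList).map (fun o =>
                    PySem.Chars.count (PySem.List.slice (pre ++ c :: suf) none (some p.1)) [o])).sum
                    = ((")]}".toList).map (fun cc =>
                    PySem.Chars.count (PySem.List.slice (pre ++ c :: suf) none (some p.1)) [cc])).sum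
              then some p.1 else none) ((pre.length : Int), c) = none := by
          exact if_neg (fun hh => h3 ⟨hh.1, hcond.mp hh.2⟩)
        rw [List.filterMap_cons_none
          (f := fun (p : Int × Char) =>
            if p.2 = ',' ∧
                (("([{".toList).map (fun o =>
                  PySem.Chars.count (PySem.List.slice (pre ++ c :: suf) none (some p.1)) [o])).sum
                  = ((")]}".toList).map (fun cc =>
                  PySem.Chars.count (PySem.List.slice (pre ++ c :: suf) none (some p.1)) [cc])).sum
            then some p.1 else none) hnone, ih']
        simp only [pvCuts, if_neg h3, List.map_map]
        apply List.map_congr_left; intro j _; simp; ring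

-- the zip of consecutive boundaries, mapped through slice, as a structural recursion
def pvZS (full : List Char) : Int → List Int → List (List Char)
  | a, [] => [PySem.List.slice full (some (a + 1)) (some (full.length : Int))]
  | a, b :: C => PySem.List.slice full (some (a + 1)) (some b) :: pvZS full b C

theorem pvZip_slices_eq_ZS (full : List Char) (C : List Int) : ∀ (a : Int),
    (List.zip (a :: C) (C ++ [(full.length : Int)])).map
      (fun ab => PySem.List.slice full (some (ab.1 + 1)) (some ab.2))
    = pvZS full a C := by
  induction C with
  | nil => intro a; simp [pvZS]
  | cons b C ih =>
      intro a
      simp only [List.cons_append, List.zip_cons_cons, List.map_cons, pvZS, ih b]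

theorem pvSlice_cons (pre rest : List Char) (c : Char) (b : Int)
    (hb : (pre.length : Int) + 1 ≤ b) :
    PySem.List.slice (pre ++ c :: rest) (some (pre.length : Int)) (some b)
      = c :: PySem.List.slice (pre ++ c :: rest) (some ((pre.length : Int) + 1)) (some b) := by
  have hd : List.drop pre.length (pre ++ c :: rest) = c :: rest := by
    simp [List.drop_left]
  have hd1 : List.drop (pre.length + 1) (pre ++ c :: rest) = rest := by
    rw [show pre ++ c :: rest = (pre ++ [c]) ++ rest by simp,
        show pre.length + 1 = (pre ++ [c]).length by simp, List.drop_left]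
  rw [show b = ((b.toNat : Nat) : Int) by omega,
      show (pre.length : Int) + 1 = (((pre.length + 1 : Nat)) : Int) by push_cast; ring,
      PySem.List.slice_natCast, PySem.List.slice_natCast, hd, hd1,
      show b.toNat - pre.length = (b.toNat - (pre.length + 1)) + 1 by omega,
      List.take_succ_cons]

theorem pvZS_cons_front (pre rest : List Char) (c : Char) (C : List Int)
    (hC : ∀ b ∈ C, (pre.length : Int) + 1 ≤ b) :
    pvZS (pre ++ c :: rest) ((pre.length : Int) - 1) C
      = pvConsHead c (pvZS (pre ++ c :: rest) (pre.length : Int) C) := by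
  cases C with
  | nil =>
      simp only [pvZS, pvConsHead]
      rw [sub_add_cancel, pvSlice_cons pre rest c _ (by simp)]
  | cons b C =>
      simp only [pvZS, pvConsHead]
      rw [sub_add_cancel, pvSlice_cons pre rest c b (hC b (by simp))]

-- slicing between consecutive cuts yields the segment list
theorem pvZS_parts (suf : List Char) : ∀ (pre : List Char),
    pvZS (pre ++ suf) ((pre.length : Int) - 1)
        ((pvCuts (pvBal pre) suf).map (fun i => i + (pre.length : Int)))
      = pvParts (pvBal pre) suf := by
  induction suf with
  | nil =>
      intro pre
      simp only [List.append_nil, pvCuts, List.map_nil, pvZS, pvParts]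
      rw [sub_add_cancel, PySem.List.slice_natCast]
      simp
  | cons c suf ih =>
      intro pre
      have hfull : (pre ++ [c]) ++ suf = pre ++ c :: suf := by simp
      have ih' := ih (pre ++ [c])
      rw [pvBal_snoc, hfull] at ih'
      have hlen : ((pre ++ [c]).length : Int) = (pre.length : Int) + 1 := by push_cast; simp
      rw [hlen, add_sub_cancel_right] at ih'
      have hM : (pvCuts (pvBal pre + pvDelta c) suf).map
            ((fun i => i + (pre.length : Int)) ∘ (· + 1))
          = (pvCuts (pvBal pre + pvDelta c) suf).map (fun i => i + ((pre.length : Int) + 1)) := by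
        apply List.map_congr_left; intro j _; simp; ring
      by_cases h3 : c = ',' ∧ pvBal pre = 0
      · have hd0 : pvDelta c = 0 := by obtain ⟨rfl, -⟩ := h3; rfl
        rw [hd0, add_zero] at ih' hM
        simp only [pvCuts, pvParts, if_pos h3, List.map_cons, List.map_map, pvZS]
        rw [hM, zero_add, sub_add_cancel, ih']
        refine List.cons_eq_cons.mpr ⟨?_, rfl⟩
        rw [PySem.List.slice_natCast]
        simp
      · have hC : ∀ b ∈ (pvCuts (pvBal pre + pvDelta c) suf).map
            (fun i => i + ((pre.length : Int) + 1)), (pre.length : Int) + 1 ≤ b := by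
          intro b hb
          obtain ⟨j, hj, rfl⟩ := List.mem_map.mp hb
          have := pvCuts_nonneg suf _ j hj
          omega
        simp only [pvCuts, pvParts, if_neg h3, List.map_map]
        rw [hM, pvZS_cons_front pre suf c _ hC, ih']

-- B = extractions of the same segment list
theorem pvB_eq (signature : String) :
    parse_param_names_py_alt signature = pvExAll (pvParts 0 (pvSigBody signature)) := by
  have hc : (PySem.List.enumerate (pvSigBody signature)).filterMap (fun p =>
      if p.2 = ',' ∧
          (("([{".toList).map (fun o =>
            PySem.Chars.count (PySem.List.slice (pvSigBody signature) none (some p.1)) [o])).sum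
            = ((")]}".toList).map (fun c =>
            PySem.Chars.count (PySem.List.slice (pvSigBody signature) none (some p.1)) [c])).sum
      then some p.1 else none)
      = pvCuts 0 (pvSigBody signature) := by
    have h := pvCuts_port (pvSigBody signature) []
    have hb0 : pvBal ([] : List Char) = 0 := by simp [pvBal]
    rw [hb0] at h
    simpa using h
  have hz : pvZS (pvSigBody signature) (-1) (pvCuts 0 (pvSigBody signature))
      = pvParts 0 (pvSigBody signature) := by
    have h := pvZS_parts (pvSigBody signature) []
    have hb0 : pvBal ([] : List Char) = 0 := by simp [pvBal]
    rw [hb0] at h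
    simpa using h
  unfold parse_param_names_py_alt
  rw [pvFilterMap_eq_exAll, hc, pvZip_slices_eq_ZS, hz]

-- ===== VERDICT (by name: the statement is the Claim_ definition above) =====
theorem parse_param_names_py_spec : Claim_equal_parse_param_names_py := by
  intro signature _
  unfold Spec_parse_param_names_py
  rw [pvA_eq, pvB_eq]
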